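-- pv_equiv track=rewrite | github.com/klbarrus/adventofcode2015 | day11.py | search_straight
-- ===== SOURCE A (Python) =====
-- def search_straight(istr):
--     ret = False
--     for x in range(len(istr)-2):
--         c1 = ord(istr[x])
--         c2 = ord(istr[x+1])
--         c3 = ord(istr[x+2])
--         if c2 == c1+1 and c3 == c2+1:
--             ret = True
--             break
--     return ret
-- ===== SOURCE B (Python) =====
-- def search_straight(istr):
--     streak = 1
--     for i in range(1, len(istr)):
--         if ord(istr[i]) == ord(istr[i-1]) + 1:
--             streak += 1
--             if streak >= 3:
--                 return True
--         else:
--             streak = 1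
--     return False
-- ===== Notes on version B (the rewrite author's own statement) =====
-- stated objective: alternative
-- what changed: Replaces the fixed-triple test at each index with a single pass over adjacent pairs that maintains a run-length counter of the current strictly-consecutive streak, returning True the moment it reaches 3.
import Mathlib
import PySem

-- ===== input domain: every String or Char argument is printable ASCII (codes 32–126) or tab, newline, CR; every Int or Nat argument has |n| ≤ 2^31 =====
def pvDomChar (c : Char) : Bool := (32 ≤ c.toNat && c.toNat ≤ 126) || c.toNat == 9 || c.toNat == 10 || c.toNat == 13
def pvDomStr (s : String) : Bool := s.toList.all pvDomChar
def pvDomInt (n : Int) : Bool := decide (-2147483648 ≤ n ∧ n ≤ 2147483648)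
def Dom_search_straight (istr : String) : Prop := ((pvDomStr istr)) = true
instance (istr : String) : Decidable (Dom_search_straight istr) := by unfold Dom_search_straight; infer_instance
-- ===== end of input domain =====

-- B replaces A's fixed-triple test at each index with a single pass over adjacent
-- pairs maintaining a run-length counter of the current consecutive streak (alternative decomposition; same O(n) cost).


-- ===== PORT A =====
-- 'for x in range(len(istr)-2)' with a break on the first increasing triple:
-- structural recursion over the list of loop indices range(len-2).
-- (istr[x] etc. via getD: every index visited is in range, so exact w.r.t. Python.)
def searchALoop (cs : List Char) : List Nat → Bool
  | [] => false
  | x :: rest =>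
    let c1 := (cs.getD x ' ').toNat
    let c2 := (cs.getD (x+1) ' ').toNat
    let c3 := (cs.getD (x+2) ' ').toNat
    if c2 = c1 + 1 ∧ c3 = c2 + 1 then true
    else searchALoop cs rest

def search_straight (istr : String) : Bool :=
  searchALoop istr.toList (List.range (istr.toList.length - 2))

-- ===== PORT B =====
-- single pass over adjacent pairs with a streak counter (prev = istr[i-1])
def searchBGo (prev : Char) (streak : Nat) : List Char → Bool
  | [] => false
  | c :: rest =>
    if c.toNat = prev.toNat + 1 then
      if streak + 1 ≥ 3 then true else searchBGo c (streak + 1) rest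
    else searchBGo c 1 rest

def search_straight_alt (istr : String) : Bool :=
  match istr.toList with
  | [] => false
  | c :: rest => searchBGo c 1 rest

-- ===== PRECONDITION & SPEC =====
def Spec_search_straight (istr : String) (out : Bool) : Prop := out = search_straight_alt istr
instance (istr : String) (out : Bool) : Decidable (Spec_search_straight istr out) := by unfold Spec_search_straight; infer_instance

-- ===== CLAIM (what is proved, stated in full; the proofs are below) =====
def Claim_equal_search_straight : Prop := ∀ (istr : String), Dom_search_straight istr → Spec_search_straight istr (search_straight istr)

-- ===== LEMMAS AND PROOFS =====

-- reference structural triple scan: both ports are proved equal to it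
def tri : List Char → Bool
  | a :: b :: c :: rest =>
    if b.toNat = a.toNat + 1 ∧ c.toNat = b.toNat + 1 then true else tri (b :: c :: rest)
  | _ => false

theorem tri_short (l : List Char) (h : l.length < 3) : tri l = false := by
  match l with
  | [] => rfl
  | [_] => rfl
  | [_, _] => rfl
  | _ :: _ :: _ :: _ => exact absurd h (by simp)

theorem tri_cons_skip (b c : Char) (r : List Char) (h : ¬ c.toNat = b.toNat + 1) :
    tri (b :: c :: r) = tri (c :: r) := by
  cases r with
  | nil => rfl
  | cons d r' =>
    show (if c.toNat = b.toNat + 1 ∧ d.toNat = c.toNat + 1 then true else tri (c :: d :: r')) = _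
    rw [if_neg (by tauto)]

theorem getD_in_range (cs : List Char) (x : Nat) (h : x < cs.length) :
    cs.getD x ' ' = cs[x] := by
  simp [List.getD, List.getElem?_eq_getElem h]

theorem searchALoop_eq_tri (cs : List Char) (m x : Nat) (hm : m = cs.length - 2 - x) :
    searchALoop cs (List.range' x m) = tri (cs.drop x) := by
  induction m generalizing x with
  | zero =>
    rw [List.range', searchALoop, tri_short]
    simp; omega
  | succ m ih =>
    have hx : x + 2 < cs.length := by omega
    have d1 : cs.drop x = cs[x]'(by omega) :: cs.drop (x+1) :=
      List.drop_eq_getElem_cons (by omega)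
    have d2 : cs.drop (x+1) = cs[x+1]'(by omega) :: cs.drop (x+2) :=
      List.drop_eq_getElem_cons (by omega)
    have d3 : cs.drop (x+2) = cs[x+2]'hx :: cs.drop (x+3) :=
      List.drop_eq_getElem_cons hx
    rw [List.range'_succ, searchALoop,
        getD_in_range cs x (by omega), getD_in_range cs (x+1) (by omega),
        getD_in_range cs (x+2) hx, d1, d2, d3, tri]
    split
    · rfl
    · rw [ih (x+1) (by omega), d2, d3]

theorem searchBGo_eq_tri (l : List Char) :
    (∀ a, searchBGo a 1 l = tri (a :: l)) ∧
    (∀ a b, b.toNat = a.toNat + 1 → searchBGo b 2 l = tri (a :: b :: l)) := by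
  induction l with
  | nil =>
    constructor
    · intro a; rfl
    · intro a b _; rw [tri_short _ (by simp)]; rfl
  | cons c r ih =>
    constructor
    · intro a
      show (if c.toNat = a.toNat + 1 then
              if 1 + 1 ≥ 3 then true else searchBGo c 2 r
            else searchBGo c 1 r) = tri (a :: c :: r)
      split
      · rename_i h
        rw [if_neg (by omega)]
        exact ih.2 a c h
      · rename_i h
        rw [ih.1 c, tri_cons_skip a c r h]
    · intro a b hab
      show (if c.toNat = b.toNat + 1 then
              if 2 + 1 ≥ 3 then true else searchBGo c 3 r
            else searchBGo c 1 r) = tri (a :: b :: c :: r)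
      rw [tri]
      split
      · rename_i h
        rw [if_pos (by omega), if_pos ⟨hab, h⟩]
      · rename_i h
        rw [if_neg (by tauto), ih.1 c, tri_cons_skip b c r h]

theorem alt_eq_tri (istr : String) : search_straight_alt istr = tri istr.toList := by
  unfold search_straight_alt
  cases h : istr.toList with
  | nil => rfl
  | cons c rest => exact (searchBGo_eq_tri rest).1 c

-- ===== VERDICT (by name: the statement is the Claim_ definition above) =====
theorem search_straight_spec : Claim_equal_search_straight := by
  intro istr _
  unfold Spec_search_straight search_straight
  rw [alt_eq_tri, List.range_eq_range',
      searchALoop_eq_tri istr.toList _ 0 (by omega), List.drop_zero]
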